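-- pv_equiv track=rewrite | github.com/amykhar/udacity-recipe-search | recipe_search.py | find_conjunction
-- ===== SOURCE A (Python) =====
-- def find_conjunction(list_of_url_lists):
--     results_list = []
--     number_of_lists = len(list_of_url_lists)
--     for url in list_of_url_lists[0]:
--         i = 1
--         found = True
--         while i < number_of_lists:
--             if url not in list_of_url_lists[i]:
--                 found = False
--             i += 1
--         if found == True:
--             if url['url'].find('http://') == -1:
--                 url = 'http://www.foodnetwork.com/' + url['url']
--                 results_list.append(url)
--         found = True
--     return results_list
-- ===== SOURCE B (Python) =====
-- def find_conjunction(list_of_url_lists):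
--     # counting strategy: build one frequency table mapping each distinct url (as a
--     # canonical hashable key) to how many of the OTHER lists contain it, then a single
--     # ordered pass over the first list keeps a url iff its count equals the number of
--     # other lists; relative urls are prefixed, absolute ones dropped, as in A.
--     n = len(list_of_url_lists)
--     counts = {}
--     for lst in list_of_url_lists[1:]:
--         for k in {frozenset(d.items()) for d in lst}:
--             counts[k] = counts.get(k, 0) + 1
--     results_list = []
--     for url in list_of_url_lists[0]:
--         if counts.get(frozenset(url.items()), 0) == n - 1:
--             u = url['url']
--             if u.find('http://') == -1:
--                 results_list.append('http://www.foodnetwork.com/' + u)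
--     return results_list
-- ===== Notes on version B (the rewrite author's own statement) =====
-- stated objective: alternative
-- what changed: Instead of A's per-url nested re-scan of every other list, B first builds a frequency table (plain counting dict keyed by frozenset(d.items())) recording for each distinct url how many of the other lists contain it, then makes one ordered pass over the first list keeping the urls whose count equals the number of other lists; the inner membership scans disappear entirely.
import Mathlib
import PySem

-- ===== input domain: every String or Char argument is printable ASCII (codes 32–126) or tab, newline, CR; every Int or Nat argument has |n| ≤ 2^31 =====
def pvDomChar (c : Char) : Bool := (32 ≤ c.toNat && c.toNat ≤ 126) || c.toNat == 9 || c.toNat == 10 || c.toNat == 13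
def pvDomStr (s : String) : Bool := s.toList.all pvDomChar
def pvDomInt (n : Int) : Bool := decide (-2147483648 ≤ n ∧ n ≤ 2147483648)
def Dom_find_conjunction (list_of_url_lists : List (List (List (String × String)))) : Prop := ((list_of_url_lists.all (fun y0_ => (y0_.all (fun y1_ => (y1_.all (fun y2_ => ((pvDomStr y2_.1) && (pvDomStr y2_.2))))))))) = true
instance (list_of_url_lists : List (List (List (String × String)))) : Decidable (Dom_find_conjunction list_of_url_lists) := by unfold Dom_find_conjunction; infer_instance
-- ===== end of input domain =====

-- B replaces A's nested membership re-scans by a counting table (url-key -> how many other lists contain it) built once, then one pass over the first list (objective: alternative).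


-- shared helper: Python's '==' on two dicts (same key→value mapping, insertion order ignored)
def pvDictEq (a b : PySem.Dict String String) : Bool :=
  a.items.all (fun p => b.get? p.1 == some p.2) && b.items.all (fun p => a.get? p.1 == some p.2)

-- ===== PORT A =====
-- each inner association list reaches Python as dict(pairs); PySem.Dict.ofList reproduces that
def find_conjunction (list_of_url_lists : List (List (List (String × String)))) : List String :=
  let dss := list_of_url_lists.map (fun l => l.map PySem.Dict.ofList)
  let number_of_lists : Int := PySem.List.len dss
  match dss with
  | [] => []   -- Python: IndexError on list_of_url_lists[0]; excluded by Pre_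
  | first :: _ =>
    first.foldl (fun results_list url =>
      let found := (PySem.List.pyRange 1 number_of_lists).foldl
        (fun found i =>
          if !((PySem.List.pyGetD dss i []).any (fun d => pvDictEq url d)) then false else found) true
      if found then
        match url.get? "url" with
        | none => results_list   -- Python: KeyError; excluded by Pre_
        | some u =>
          if PySem.Str.find u "http://" == -1 then
            results_list ++ ["http://www.foodnetwork.com/" ++ u]
          else results_list
      else results_list) []

-- ===== PORT B =====
-- frozenset(d.items()) is modelled by the key-sorted items list: since a dict's keys are
-- distinct, two such canonical forms are equal exactly when the item frozensets are equal
def pvCanon (d : PySem.Dict String String) : List (String × String) :=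
  PySem.List.sorted d.items (fun p => p.1)

def find_conjunction_alt (list_of_url_lists : List (List (List (String × String)))) : List String :=
  let dss := list_of_url_lists.map (fun l => l.map PySem.Dict.ofList)
  let n : Int := PySem.List.len dss
  match dss with
  | [] => []   -- Python: IndexError on list_of_url_lists[0]; excluded by Pre_
  | first :: rest =>
    -- counts[k] = counts.get(k, 0) + 1, per distinct url-key of each remaining list
    let counts : PySem.Dict (List (String × String)) Int :=
      rest.foldl (fun c lst =>
        (PySem.Set.ofList (lst.map pvCanon)).foldl
          (fun c k => c.insert k (c.getD k 0 + 1)) c) PySem.Dict.empty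
    first.foldl (fun results_list url =>
      if counts.getD (pvCanon url) 0 == n - 1 then
        match url.get? "url" with
        | none => results_list   -- Python: KeyError; excluded by Pre_
        | some u =>
          if PySem.Str.find u "http://" == -1 then
            results_list ++ ["http://www.foodnetwork.com/" ++ u]
          else results_list
      else results_list) []

-- ===== PRECONDITION & SPEC =====
-- Pre_ excludes exactly the inputs where A raises: the empty outer list (IndexError), and
-- inputs whose first list has a dict present (under Python dict ==) in every other list but
-- lacking the key 'url' (KeyError on url['url']).
def Pre_find_conjunction (list_of_url_lists : List (List (List (String × String)))) : Prop :=
  list_of_url_lists ≠ [] ∧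
  ∀ praw ∈ list_of_url_lists.headD [],
    (list_of_url_lists.tail.all
        (fun lraw => (lraw.map PySem.Dict.ofList).any
          (fun d => pvDictEq (PySem.Dict.ofList praw) d)) = true) →
    (PySem.Dict.ofList praw).contains "url" = true
instance (list_of_url_lists : List (List (List (String × String)))) : Decidable (Pre_find_conjunction list_of_url_lists) := by unfold Pre_find_conjunction; infer_instance

def pvWitness_find_conjunction : (List (List (List (String × String)))) := [[[("url", "a/b")]]]

def Spec_find_conjunction (list_of_url_lists : List (List (List (String × String)))) (out : List String) : Prop := out = find_conjunction_alt list_of_url_lists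
instance (list_of_url_lists : List (List (List (String × String)))) (out : List String) : Decidable (Spec_find_conjunction list_of_url_lists out) := by unfold Spec_find_conjunction; infer_instance

-- ===== CLAIM (what is proved, stated in full; the proofs are below) =====
def Claim_equal_find_conjunction : Prop := ∀ (list_of_url_lists : List (List (List (String × String)))), Dom_find_conjunction list_of_url_lists → Pre_find_conjunction list_of_url_lists → Spec_find_conjunction list_of_url_lists (find_conjunction list_of_url_lists)

-- ===== LEMMAS AND PROOFS =====

theorem pvDictEq_iff_canon (a b : PySem.Dict String String)
    (ha : a.keys.Nodup) (hb : b.keys.Nodup) :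
    pvDictEq a b = true ↔ pvCanon a = pvCanon b := by
  have ha' : (a.items.map Prod.fst).Nodup := ha
  have hb' : (b.items.map Prod.fst).Nodup := hb
  have hia : a.items.Nodup := ha'.of_map
  have hib : b.items.Nodup := hb'.of_map
  constructor
  · intro h
    simp only [pvDictEq, Bool.and_eq_true, List.all_eq_true, beq_iff_eq] at h
    obtain ⟨h1, h2⟩ := h
    have hperm : a.items.Perm b.items := by
      rw [List.perm_ext_iff_of_nodup hia hib]
      rintro ⟨k, v⟩
      constructor
      · intro hp; exact PySem.Dict.mem_items_of_get?_eq_some b (h1 (k, v) hp)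
      · intro hp; exact PySem.Dict.mem_items_of_get?_eq_some a (h2 (k, v) hp)
    unfold pvCanon
    apply PySem.List.sorted_eq_of_perm_of_pairwise_lt
    · exact (PySem.List.sorted_perm b.items (fun p => p.1) false).trans hperm.symm
    · have hle := PySem.List.sorted_pairwise b.items (fun p => p.1)
      have hndk : ((PySem.List.sorted b.items (fun p => p.1) false).map Prod.fst).Nodup := by
        have hp : (PySem.List.sorted b.items (fun p => p.1) false).Perm b.items :=
          PySem.List.sorted_perm _ _ _
        exact ((hp.map Prod.fst).nodup_iff).mpr hb'
      have hne := List.pairwise_map.mp hndk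
      exact (hle.and hne).imp (fun h => lt_of_le_of_ne h.1 h.2)
  · intro h
    unfold pvCanon at h
    have hperm : a.items.Perm b.items := by
      have h1 := (PySem.List.sorted_perm a.items (fun p => p.1) false).symm
      rw [h] at h1
      exact h1.trans (PySem.List.sorted_perm b.items (fun p => p.1) false)
    simp only [pvDictEq, Bool.and_eq_true, List.all_eq_true, beq_iff_eq]
    constructor
    · rintro ⟨k, v⟩ hp
      exact PySem.Dict.get?_of_mem_items b (hperm.mem_iff.mp hp) hb
    · rintro ⟨k, v⟩ hp
      exact PySem.Dict.get?_of_mem_items a (hperm.mem_iff.mpr hp) ha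

theorem pv_any_eq_mem (url : PySem.Dict String String) (hu : url.keys.Nodup)
    (lst : List (PySem.Dict String String)) (h : ∀ d ∈ lst, d.keys.Nodup) :
    lst.any (fun d => pvDictEq url d) = decide (pvCanon url ∈ lst.map pvCanon) := by
  rw [Bool.eq_iff_iff, decide_eq_true_iff, List.any_eq_true]
  constructor
  · rintro ⟨d, hd, hed⟩
    exact List.mem_map.mpr ⟨d, hd, ((pvDictEq_iff_canon url d hu (h d hd)).mp hed).symm⟩
  · intro hmem
    obtain ⟨d, hd, hcd⟩ := List.mem_map.mp hmem
    exact ⟨d, hd, (pvDictEq_iff_canon url d hu (h d hd)).mpr hcd.symm⟩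

-- the counting loop: after folding all key-sets into the dict, each key's count is
-- its starting value plus the number of occurrences across the folded lists
theorem pv_getD_double_foldl {α β : Type} [BEq α] [LawfulBEq α]
    (S : List β) (g : β → List α) (d : PySem.Dict α Int) (k : α) :
    (S.foldl (fun c lst => (g lst).foldl (fun c x => c.insert x (c.getD x 0 + 1)) c) d).getD k 0
      = d.getD k 0 + ((S.map (fun s => ((g s).count k : Int))).sum) := by
  induction S generalizing d with
  | nil => simp
  | cons s S ih =>
    simp only [List.foldl_cons, List.map_cons, List.sum_cons]
    rw [ih, PySem.Dict.getD_foldl_insert_add_one]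
    ring

theorem pv_count_nodup {α : Type} [BEq α] [LawfulBEq α] [DecidableEq α]
    (s : List α) (hs : s.Nodup) (k : α) :
    s.count k = if k ∈ s then 1 else 0 := by
  split_ifs with h
  · exact List.count_eq_one_of_mem hs h
  · exact List.count_eq_zero_of_not_mem h

theorem pv_sum_ite_eq_countP {β : Type} (S : List β) (p : β → Bool) :
    ((S.map (fun s => if p s then (1 : Int) else 0)).sum) = (S.countP p : Int) := by
  induction S with
  | nil => simp
  | cons b S ih =>
    simp only [List.map_cons, List.sum_cons, List.countP_cons, ih]
    by_cases h : p b
    · simp [h, add_comm]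
    · simp [h]

theorem pv_cons_eq (first : List (List (String × String)))
    (rest : List (List (List (String × String)))) :
    find_conjunction (first :: rest) = find_conjunction_alt (first :: rest) := by
  unfold find_conjunction find_conjunction_alt
  simp only [List.map_cons]
  apply PySem.List.foldl_congr_mem
  intro acc url hurl
  obtain ⟨praw, hpraw, rfl⟩ := List.mem_map.mp hurl
  have hu : (PySem.Dict.ofList praw).keys.Nodup := PySem.Dict.nodup_keys_ofList praw
  set k := pvCanon (PySem.Dict.ofList praw) with hk
  -- A's inner while-loop equals "every other list contains this url"
  have hfound := PySem.List.foldl_pyRange_pyGetD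
      (xs := (first.map PySem.Dict.ofList) :: rest.map (fun l => l.map PySem.Dict.ofList))
      (d := [])
      (f := fun found lst =>
        if !(lst.any (fun d => pvDictEq (PySem.Dict.ofList praw) d)) then false else found)
      (init := true) (a := 1) (by norm_num)
  simp only [Int.toNat_one, List.drop_succ_cons, List.drop_zero] at hfound
  have hmem : ∀ lst ∈ rest.map (fun l => l.map PySem.Dict.ofList),
      (!(lst.any (fun d => pvDictEq (PySem.Dict.ofList praw) d)))
        = (!(decide (k ∈ lst.map pvCanon))) := by
    intro lst hlst
    obtain ⟨lraw, hlraw, rfl⟩ := List.mem_map.mp hlst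
    have hnd : ∀ d ∈ lraw.map PySem.Dict.ofList, (PySem.Dict.keys d).Nodup := by
      intro d hd
      obtain ⟨draw, hdraw, rfl⟩ := List.mem_map.mp hd
      exact PySem.Dict.nodup_keys_ofList draw
    rw [pv_any_eq_mem (PySem.Dict.ofList praw) hu (lraw.map PySem.Dict.ofList) hnd]
  have hchain :
      (PySem.List.pyRange 1
          (PySem.List.len
            ((first.map PySem.Dict.ofList) :: rest.map (fun l => l.map PySem.Dict.ofList)))).foldl
        (fun found i =>
          if !((PySem.List.pyGetD
                ((first.map PySem.Dict.ofList) :: rest.map (fun l => l.map PySem.Dict.ofList)) i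
                []).any (fun d => pvDictEq (PySem.Dict.ofList praw) d)) then false else found) true
      = (rest.map (fun l => l.map PySem.Dict.ofList)).all
          (fun lst => decide (k ∈ lst.map pvCanon)) := by
    calc
      _ = (rest.map (fun l => l.map PySem.Dict.ofList)).foldl
            (fun found lst =>
              if !(lst.any (fun d => pvDictEq (PySem.Dict.ofList praw) d)) then false else found)
            true := hfound
      _ = (true && !((rest.map (fun l => l.map PySem.Dict.ofList)).any
            (fun lst => !(lst.any (fun d => pvDictEq (PySem.Dict.ofList praw) d))))) :=
          PySem.List.foldl_if_false_eq _ _ _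
      _ = !((rest.map (fun l => l.map PySem.Dict.ofList)).any
            (fun lst => !(lst.any (fun d => pvDictEq (PySem.Dict.ofList praw) d)))) :=
          Bool.true_and _
      _ = !((rest.map (fun l => l.map PySem.Dict.ofList)).any
            (fun lst => !(decide (k ∈ lst.map pvCanon)))) :=
          congrArg Bool.not (PySem.List.any_congr_mem hmem)
      _ = (rest.map (fun l => l.map PySem.Dict.ofList)).all
            (fun lst => decide (k ∈ lst.map pvCanon)) :=
          (List.all_eq_not_any_not).symm
  -- B's counter lookup equals the same "every other list contains this url" test
  have hcnt :
      ((rest.map (fun l => l.map PySem.Dict.ofList)).foldl (fun c lst =>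
          (PySem.Set.ofList (lst.map pvCanon)).foldl
            (fun c k' => c.insert k' (c.getD k' 0 + 1)) c) PySem.Dict.empty).getD k 0
        = ((rest.map (fun l => l.map PySem.Dict.ofList)).countP
            (fun lst => decide (k ∈ lst.map pvCanon)) : Int) := by
    rw [pv_getD_double_foldl _ (fun lst => PySem.Set.ofList (List.map pvCanon lst))]
    simp only [PySem.Dict.getD_empty, zero_add]
    have hmap : ∀ lst ∈ rest.map (fun l => l.map PySem.Dict.ofList),
        ((PySem.Set.ofList (List.map pvCanon lst)).count k : Int)
          = if decide (k ∈ List.map pvCanon lst) then (1 : Int) else 0 := by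
      intro lst _
      rw [pv_count_nodup _ (PySem.Set.nodup_ofList _) k]
      by_cases h : k ∈ List.map pvCanon lst <;>
        simp [PySem.Set.mem_ofList, h]
    rw [List.map_congr_left hmap]
    exact pv_sum_ite_eq_countP _ _
  have hlen : (PySem.List.len
      ((first.map PySem.Dict.ofList) :: rest.map (fun l => l.map PySem.Dict.ofList)) : Int) - 1
      = ((rest.map (fun l => l.map PySem.Dict.ofList)).length : Int) := by
    simp [PySem.List.len_eq]
  have hb : (((rest.map (fun l => l.map PySem.Dict.ofList)).countP
          (fun lst => decide (k ∈ lst.map pvCanon)) : Int)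
        == (PySem.List.len
            ((first.map PySem.Dict.ofList) :: rest.map (fun l => l.map PySem.Dict.ofList)) : Int) - 1)
      = (rest.map (fun l => l.map PySem.Dict.ofList)).all
          (fun lst => decide (k ∈ lst.map pvCanon)) := by
    rw [hlen, Bool.eq_iff_iff, beq_iff_eq, Nat.cast_inj, List.all_eq_true]
    constructor
    · intro h lst hlst
      have := List.countP_eq_length.mp h lst hlst
      exact this
    · intro h
      exact List.countP_eq_length.mpr h
  have hfinal :
      (PySem.List.pyRange 1
          (PySem.List.len
            ((first.map PySem.Dict.ofList) :: rest.map (fun l => l.map PySem.Dict.ofList)))).foldl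
        (fun found i =>
          if !((PySem.List.pyGetD
                ((first.map PySem.Dict.ofList) :: rest.map (fun l => l.map PySem.Dict.ofList)) i
                []).any (fun d => pvDictEq (PySem.Dict.ofList praw) d)) then false else found) true
      = (((rest.map (fun l => l.map PySem.Dict.ofList)).foldl (fun c lst =>
            (PySem.Set.ofList (lst.map pvCanon)).foldl
              (fun c k' => c.insert k' (c.getD k' 0 + 1)) c) PySem.Dict.empty).getD k 0
          == (PySem.List.len
              ((first.map PySem.Dict.ofList) :: rest.map (fun l => l.map PySem.Dict.ofList)) : Int) - 1) :=
    hchain.trans (by rw [hcnt, hb])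
  split_ifs with h1 h2 h3
  · rfl
  · exact absurd (hfinal.symm.trans h1) h2
  · exact absurd (hfinal.trans h3) h1
  · rfl

-- ===== VERDICT (by name: the statement is the Claim_ definition above) =====
theorem find_conjunction_spec : Claim_equal_find_conjunction := by
  intro L hDom hPre
  unfold Spec_find_conjunction
  obtain ⟨hne, -⟩ := hPre
  cases L with
  | nil => exact absurd rfl hne
  | cons first rest => exact pv_cons_eq first rest
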